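-- pv_equiv track=rewrite | github.com/rand-projects/fisb-decode | fisb/level0/apdu_global_block.py | addBits
-- ===== SOURCE A (Python) =====
-- def addBits(byte, numberOfBits, bitmap):
--     """Used by ``emptyBlockBitmap`` to turn a byte or part of a byte into a bitstring.
--
--     Turns MSB ``numberOfBits`` into a bitstring and appends it to
--     ``bitmap``.
--
--     NOTE: bits are ordered from LSB to MSB for adding to bitstring. The
--     result string has the blocks ordered left to right.
--
--     Args:
--         byte (byte array): Byte to turn into a bit string.
--         numberOfBits (int): Number of bits (starting from the MSB) to
--             convert. This is needed because there is one case where we only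
--             need to convert the lower half of a byte, instead of an
--             entire byte. This is usually called with 4 or 8.
--         bitmap (str): Current bitstring. This will be returned with the
--             new bits appended.
--
--     Returns:
--         str: Bitmap with new bits appended to the end.
--     """
--     for _ in range(numberOfBits, 0, -1):
--         if (byte & 0x01) != 0:
--             bitmap = bitmap + '1'
--         else:
--             bitmap = bitmap + '0'
--
--         byte = byte >> 1
--
--     return bitmap
-- ===== SOURCE B (Python) =====
-- def addBits(byte, numberOfBits, bitmap):
--     if numberOfBits <= 0:
--         return bitmap
--     v = byte & ((1 << numberOfBits) - 1)
--     return bitmap + format(v, '0{}b'.format(numberOfBits))[::-1]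
-- ===== Notes on version B (the rewrite author's own statement) =====
-- stated objective: faster
-- what changed: Replaced the per-bit shift-and-append loop by a closed-form build: mask the low numberOfBits bits and format them as a zero-padded binary string, reversed to LSB-first order (guarding numberOfBits <= 0).
import Mathlib
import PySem

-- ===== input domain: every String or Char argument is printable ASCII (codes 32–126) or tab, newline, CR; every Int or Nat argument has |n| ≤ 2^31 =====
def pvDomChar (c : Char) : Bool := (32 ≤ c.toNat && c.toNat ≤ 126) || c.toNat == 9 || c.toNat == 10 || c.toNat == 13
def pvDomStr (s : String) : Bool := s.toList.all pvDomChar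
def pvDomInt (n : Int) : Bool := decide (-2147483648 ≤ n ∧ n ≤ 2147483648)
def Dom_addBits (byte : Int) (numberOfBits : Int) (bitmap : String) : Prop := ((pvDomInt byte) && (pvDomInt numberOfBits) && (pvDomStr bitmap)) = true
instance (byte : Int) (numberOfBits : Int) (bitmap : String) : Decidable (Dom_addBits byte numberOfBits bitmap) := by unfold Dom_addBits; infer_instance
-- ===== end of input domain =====

-- ===== PORT A =====
-- Port of A: per-bit loop, testing byte & 1 and shifting right each iteration.
def addBits (byte : Int) (numberOfBits : Int) (bitmap : String) : String :=
  let st := (PySem.List.pyRange numberOfBits 0 (-1)).foldl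
    (fun (st : Int × List Char) _ =>
      let bm := if PySem.Int.band st.1 1 ≠ 0 then st.2 ++ ['1'] else st.2 ++ ['0']
      (st.1 >>> (1:Nat), bm))
    (byte, bitmap.toList)
  String.ofList st.2

-- ===== PORT B =====
-- B: closed-form build — mask the low bits, format MSB-first zero-padded binary, reverse.
-- formatBin width v ports format(v, '0{width}b') for 0 ≤ v < 2^width (MSB first, zero-padded).
def formatBin (width : Nat) (v : Int) : List Char :=
  (List.range width).map (fun i => if v / 2 ^ (width - 1 - i) % 2 = 1 then '1' else '0')

def addBits_alt (byte : Int) (numberOfBits : Int) (bitmap : String) : String :=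
  if numberOfBits ≤ 0 then bitmap
  else
    let v := PySem.Int.band byte ((1 <<< numberOfBits.toNat) - 1)
    String.ofList (bitmap.toList ++ (formatBin numberOfBits.toNat v).reverse)

-- ===== PRECONDITION & SPEC =====
def Spec_addBits (byte : Int) (numberOfBits : Int) (bitmap : String) (out : String) : Prop := out = addBits_alt byte numberOfBits bitmap
instance (byte : Int) (numberOfBits : Int) (bitmap : String) (out : String) : Decidable (Spec_addBits byte numberOfBits bitmap out) := by unfold Spec_addBits; infer_instance

-- ===== CLAIM (what is proved, stated in full; the proofs are below) =====
def Claim_equal_addBits : Prop := ∀ (byte : Int) (numberOfBits : Int) (bitmap : String), Dom_addBits byte numberOfBits bitmap → Spec_addBits byte numberOfBits bitmap (addBits byte numberOfBits bitmap)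

-- ===== LEMMAS AND PROOFS =====

-- A's loop body, recursing on the (element-independent) iteration count.
def loopA : Nat → (Int × List Char) → (Int × List Char)
  | 0, st => st
  | n+1, st => loopA n (st.1 >>> (1:Nat), if PySem.Int.band st.1 1 ≠ 0 then st.2 ++ ['1'] else st.2 ++ ['0'])

-- the LSB-first bit list both programs produce
def lsb (n : Nat) (b : Int) : List Char :=
  (List.range n).map (fun i => if b / 2 ^ i % 2 = 1 then '1' else '0')

theorem foldl_eq_loopA (l : List Int) (st : Int × List Char) :
    l.foldl (fun (st : Int × List Char) _ =>
      let bm := if PySem.Int.band st.1 1 ≠ 0 then st.2 ++ ['1'] else st.2 ++ ['0']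
      (st.1 >>> (1:Nat), bm)) st = loopA l.length st := by
  induction l generalizing st with
  | nil => rfl
  | cons x xs ih =>
    simp only [List.foldl_cons, List.length_cons]
    rw [ih]
    simp [loopA]

theorem lsb_succ (n : Nat) (b : Int) :
    lsb (n+1) b = (if b % 2 = 1 then '1' else '0') :: lsb n (b >>> (1:Nat)) := by
  unfold lsb
  rw [List.range_succ_eq_map]
  simp only [List.map_cons, List.map_map, pow_zero, Int.ediv_one]
  congr 1
  apply List.map_congr_left
  intro i _
  have h : b / 2 ^ (i+1) = (b >>> (1:Nat)) / 2 ^ i := by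
    rw [Int.shiftRight_eq_div_pow, Int.ediv_ediv_of_nonneg (by norm_num)]
    congr 1
    push_cast
    ring
  simp [Function.comp, h]

theorem loopA_snd (n : Nat) (b : Int) (acc : List Char) :
    (loopA n (b, acc)).2 = acc ++ lsb n b := by
  induction n generalizing b acc with
  | zero => simp [loopA, lsb]
  | succ m ih =>
    rw [loopA, lsb_succ]
    rw [ih]
    have hb : PySem.Int.band b 1 = b % 2 := by
      rw [PySem.Int.band_one, PySem.Int.mod_eq_emod_of_pos (by norm_num)]
    rcases Int.emod_two_eq b with h | h <;> simp [hb, h]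

-- the mask is a remainder: a & (2^n - 1) = a % 2^n
theorem band_mask (a : Int) (n : Nat) :
    PySem.Int.band a ((2:Int) ^ n - 1) = a % 2 ^ n := by
  have hp : (0:Int) < 2 ^ n := by positivity
  have hN : ((2:Int) ^ n - 1).toNat = 2 ^ n - 1 := by
    rw [show ((2:Int) ^ n - 1) = ((2 ^ n - 1 : Nat) : Int) by
      rw [Nat.cast_sub Nat.one_le_two_pow]; push_cast; ring]
    exact Int.toNat_natCast _
  by_cases ha : 0 ≤ a
  · obtain ⟨m, rfl⟩ := Int.eq_ofNat_of_zero_le ha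
    rw [PySem.Int.band, if_pos (by exact_mod_cast Int.natCast_nonneg m),
        if_pos (by linarith : (0:Int) ≤ 2 ^ n - 1)]
    rw [Int.toNat_natCast, hN, Nat.and_two_pow_sub_one_eq_mod]
    push_cast
    ring
  · push Not at ha
    set m : Nat := (-a - 1).toNat with hm
    have ham : a = -((m : Int) + 1) := by
      have : ((m : Int)) = -a - 1 := Int.toNat_of_nonneg (by omega)
      omega
    rw [PySem.Int.band, if_neg (by omega), if_pos (by linarith : (0:Int) ≤ 2 ^ n - 1)]
    rw [hN, Nat.and_comm, Nat.and_two_pow_sub_one_eq_mod]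
    set K : Nat := 2 ^ n with hKdef
    set P : Int := 2 ^ n with hPdef
    have hcast : ((K : Nat) : Int) = P := by rw [hKdef, hPdef]; push_cast; ring
    set r : Nat := m % K with hrdef
    set q : Nat := m / K with hqdef
    have hdm : K * q + r = m := Nat.div_add_mod m K
    have hrK : r < K := Nat.mod_lt _ (by positivity)
    have hK1 : 1 ≤ K := Nat.one_le_two_pow
    have hq : P * (q : Int) + (r : Int) = (m : Int) := by
      rw [← hcast]; exact_mod_cast hdm
    have hx : a = (P - 1 - (r : Int)) + P * (-(q : Int) - 1) := by
      rw [ham, show ((m : Int)) = P * (q : Int) + (r : Int) from hq.symm]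
      ring
    rw [hx, Int.add_mul_emod_self_left]
    rw [Int.emod_eq_of_lt (by omega) (by omega)]
    omega

-- bit i of a % 2^n equals bit i of a, for i < n
theorem key_bit (a : Int) (n i : Nat) (h : i < n) :
    a % 2 ^ n / 2 ^ i % 2 = a / 2 ^ i % 2 := by
  have h1 : (2:Int) ^ i * (2 ^ (n - i) * (a / 2 ^ n)) = 2 ^ n * (a / 2 ^ n) := by
    rw [← mul_assoc, ← pow_add]
    congr 2
    omega
  have h2 : a = a % 2 ^ n + 2 ^ i * (2 ^ (n - i) * (a / 2 ^ n)) := by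
    rw [h1]
    have := Int.mul_ediv_add_emod a (2 ^ n)
    linarith
  conv_rhs => rw [h2]
  rw [Int.add_mul_ediv_left _ _ (by positivity : (2:Int) ^ i ≠ 0)]
  have h3 : (2:Int) ^ (n - i) * (a / 2 ^ n) = 2 * (2 ^ (n - i - 1) * (a / 2 ^ n)) := by
    rw [← mul_assoc, ← pow_succ']
    congr 2
    omega
  rw [h3, Int.add_mul_emod_self_left]

theorem formatBin_reverse (n : Nat) (v : Int) :
    (formatBin n v).reverse = lsb n v := by
  apply List.ext_getElem
  · simp [formatBin, lsb]
  · intro i h1 h2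
    have hi : i < n := by simpa [lsb] using h2
    simp only [formatBin, lsb, List.getElem_reverse, List.getElem_map, List.getElem_range,
      List.length_map, List.length_range]
    have he : n - 1 - (n - 1 - i) = i := by omega
    rw [he]

-- ===== VERDICT (by name: the statement is the Claim_ definition above) =====
theorem addBits_spec : Claim_equal_addBits := by
  intro byte numberOfBits bitmap _
  unfold Spec_addBits addBits addBits_alt
  by_cases hn : numberOfBits ≤ 0
  · simp only [if_pos hn]
    have : PySem.List.pyRange numberOfBits 0 (-1) = [] := by
      simp [PySem.List.pyRange]
      intro h
      omega
    simp [this, String.ofList_toList]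
  · simp only [if_neg hn]
    push Not at hn
    have hlen : (PySem.List.pyRange numberOfBits 0 (-1)).length = numberOfBits.toNat := by
      simp [PySem.List.pyRange, if_pos hn]
    rw [foldl_eq_loopA, hlen, loopA_snd]
    congr 1
    rw [formatBin_reverse]
    have h2 : (((1 <<< numberOfBits.toNat : Nat) : Int) - 1) = 2 ^ numberOfBits.toNat - 1 := by
      simp [Nat.shiftLeft_eq]
    rw [h2, band_mask]
    unfold lsb
    refine congrArg (fun l => bitmap.toList ++ l) ?_
    apply List.map_congr_left
    intro i hi
    rw [key_bit byte numberOfBits.toNat i (List.mem_range.mp hi)]
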